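-- pv_equiv track=rewrite | github.com/benquick123/code-profiling | code/batch-2/vse-naloge-brez-testov/DN6-M-038.py | besedilo
-- ===== SOURCE A (Python) =====
-- def besedilo(tvit):
--     this= []
--     notime = False
--     for črka in tvit:
--         if notime == True  :
--             this.append(črka)
--         if črka== ":":
--             notime = True
--     for all in this:
--         if all == " ":
--             this.remove(all)
--             break
--
--     return "".join(this)
-- ===== SOURCE B (Python) =====
-- def besedilo(tvit):
--     _, sep, after = tvit.partition(":")
--     return after.replace(" ", "", 1) if sep else ""
-- ===== Notes on version B (the rewrite author's own statement) =====
-- stated objective: idiomatic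
-- what changed: Replaces the two explicit character loops (flag-driven collection after the first colon and a scan-and-remove pass for the first space) with str.partition at the first colon plus a single replace with count 1.
import Mathlib
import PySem

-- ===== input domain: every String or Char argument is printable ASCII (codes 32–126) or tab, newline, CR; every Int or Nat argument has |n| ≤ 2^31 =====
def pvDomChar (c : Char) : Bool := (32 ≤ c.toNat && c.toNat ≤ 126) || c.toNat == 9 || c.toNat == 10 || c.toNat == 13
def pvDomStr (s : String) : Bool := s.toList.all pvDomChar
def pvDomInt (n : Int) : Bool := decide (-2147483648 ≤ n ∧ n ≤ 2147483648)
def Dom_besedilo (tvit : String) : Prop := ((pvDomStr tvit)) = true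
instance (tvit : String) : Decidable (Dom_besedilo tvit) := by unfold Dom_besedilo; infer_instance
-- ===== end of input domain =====

-- B replaces A's two explicit character loops (flag-driven collection after the first ':',
-- then a scan-and-remove pass for the first space) with partition at the first colon plus
-- a single remove-first-space step (str.partition + replace(" ", "", 1)) — idiomatic, same cost.


-- ===== PORT A =====
-- first loop body: append when the flag is already set, then set the flag on ':'
def besediloStep (st : List Char × Bool) (c : Char) : List Char × Bool :=
  let this := if st.2 then st.1 ++ [c] else st.1
  let notime := if c = ':' then true else st.2
  (this, notime)

-- second loop: 'for all in this: if all == " ": this.remove(all); break'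
-- (the element iterated is present, so remove? returns some; getD is never the default branch)
def besediloRemoveLoop : List Char → List Char → List Char
  | [], this => this
  | c :: rest, this =>
      if c = ' ' then (PySem.List.remove? this c).getD this
      else besediloRemoveLoop rest this

def besedilo (tvit : String) : String :=
  let st := tvit.toList.foldl besediloStep ([], false)
  String.ofList (besediloRemoveLoop st.1 st.1)

-- ===== PORT B =====
-- tvit.partition(":"): the part after the first ':', none when there is no colon
def besediloAfterColon : List Char → Option (List Char)
  | [] => none
  | c :: rest => if c = ':' then some rest else besediloAfterColon rest

-- after.replace(" ", "", 1): drop the first space, if any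
def besediloDropFirstSpace : List Char → List Char
  | [] => []
  | c :: rest => if c = ' ' then rest else c :: besediloDropFirstSpace rest

def besedilo_alt (tvit : String) : String :=
  match besediloAfterColon tvit.toList with
  | none => ""
  | some after => String.ofList (besediloDropFirstSpace after)

-- ===== PRECONDITION & SPEC =====
def Spec_besedilo (tvit : String) (out : String) : Prop := out = besedilo_alt tvit
instance (tvit : String) (out : String) : Decidable (Spec_besedilo tvit out) := by unfold Spec_besedilo; infer_instance

-- ===== CLAIM (what is proved, stated in full; the proofs are below) =====
def Claim_equal_besedilo : Prop := ∀ (tvit : String), Dom_besedilo tvit → Spec_besedilo tvit (besedilo tvit)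

-- ===== LEMMAS AND PROOFS =====

-- once the flag is true, the first loop just appends every remaining character
lemma foldl_step_true (cs acc : List Char) :
    cs.foldl besediloStep (acc, true) = (acc ++ cs, true) := by
  induction cs generalizing acc with
  | nil => simp
  | cons c rest ih =>
      have hb : besediloStep (acc, true) c = (acc ++ [c], true) := by
        simp [besediloStep]
      rw [List.foldl_cons, hb, ih]
      simp

-- from the flag-false state, the first loop yields exactly the part after the first colon
lemma foldl_step_false (cs acc : List Char) :
    cs.foldl besediloStep (acc, false) =
      match besediloAfterColon cs with
      | none => (acc, false)
      | some r => (acc ++ r, true) := by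
  induction cs generalizing acc with
  | nil => simp [besediloAfterColon]
  | cons c rest ih =>
    by_cases h : c = ':'
    · simp [besediloAfterColon, h, besediloStep, foldl_step_true]
    · have hb : besediloStep (acc, false) c = (acc, false) := by
        simp [besediloStep, h]
      rw [List.foldl_cons, hb, ih]
      simp [besediloAfterColon, h]

lemma remove?_no_space_prefix (pre rest : List Char) (h : ' ' ∉ pre) :
    PySem.List.remove? (pre ++ ' ' :: rest) ' ' = some (pre ++ rest) := by
  induction pre with
  | nil => simp
  | cons p ps ih =>
    have hp : p ≠ ' ' := fun he => h (by simp [he])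
    rw [List.cons_append, PySem.List.remove?_cons_of_ne _ hp,
        ih (fun hm => h (List.mem_cons_of_mem _ hm))]
    rfl

-- the scan-and-remove loop over a suffix (no space in the dropped prefix) drops the first space
lemma removeLoop_eq (suf pre : List Char) (h : ' ' ∉ pre) :
    besediloRemoveLoop suf (pre ++ suf) = pre ++ besediloDropFirstSpace suf := by
  induction suf generalizing pre with
  | nil => simp [besediloRemoveLoop, besediloDropFirstSpace]
  | cons c rest ih =>
    by_cases hc : c = ' '
    · subst hc
      simp [besediloRemoveLoop, besediloDropFirstSpace, remove?_no_space_prefix pre rest h]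
    · have h' : ' ' ∉ pre ++ [c] := by
        intro hm
        rcases List.mem_append.mp hm with hm | hm
        · exact h hm
        · exact hc ((List.mem_singleton.mp hm).symm)
      have := ih (pre ++ [c]) h'
      simp only [List.append_assoc, List.singleton_append] at this
      simp [besediloRemoveLoop, hc, besediloDropFirstSpace, this]

-- ===== VERDICT (by name: the statement is the Claim_ definition above) =====
theorem besedilo_spec : Claim_equal_besedilo := by
  intro tvit _
  unfold Spec_besedilo besedilo besedilo_alt
  rw [foldl_step_false]
  cases hpc : besediloAfterColon tvit.toList with
  | none => simp [besediloRemoveLoop]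
  | some r =>
    simp only
    have := removeLoop_eq r [] (by simp)
    simpa using congrArg String.ofList this
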